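-- pv_equiv track=rewrite | github.com/akash-mitra/pykarma | ex-1.py | find_a_digit
-- ===== SOURCE A (Python) =====
-- from itertools import permutations
--
-- word_to_num_map = {
--     'zero': 0,
--     'one': 1,
--     'two': 2,
--     'three': 3,
--     'four': 4,
--     'five': 5,
--     'six': 6,
--     'seven': 7,
--     'eight': 8,
--     'nine': 9,
-- }
--
-- def find_a_digit (jumble):
--     min_len = 3
--     max_len = 6
--     for i in range(min_len, max_len):
--         for p in list(permutations(jumble, i)):
--             c = ''.join(p)
--             if c in word_to_num_map:
--                 return (word_to_num_map[c], c)
--     return (None, None)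
-- ===== SOURCE B (Python) =====
-- word_to_num_map = {
--     'zero': 0,
--     'one': 1,
--     'two': 2,
--     'three': 3,
--     'four': 4,
--     'five': 5,
--     'six': 6,
--     'seven': 7,
--     'eight': 8,
--     'nine': 9,
-- }
--
-- def find_a_digit(jumble):
--     # Prefix-trie-pruned backtracking: explore index choices in the same order as
--     # the permutation enumeration, but only while the built string is still a
--     # prefix of some digit word of the target length.
--     chars = list(jumble)
--     for k in range(3, 6):
--         prefixes = set()
--         for w in word_to_num_map:
--             if len(w) == k:
--                 for j in range(k + 1):
--                     prefixes.add(w[:j])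
--
--         def dfs(avail, prefix):
--             if len(prefix) == k:
--                 return prefix
--             for idx in range(len(avail)):
--                 p2 = prefix + avail[idx]
--                 if p2 in prefixes:
--                     r = dfs(avail[:idx] + avail[idx + 1:], p2)
--                     if r is not None:
--                         return r
--             return None
--
--         w = dfs(chars, '')
--         if w is not None:
--             return (word_to_num_map[w], w)
--     return (None, None)
-- ===== Notes on version B (the rewrite author's own statement) =====
-- stated objective: faster
-- what changed: A materialises every length-k permutation of the jumble (k=3,4,5) and tests each joined string against the dict; B runs a backtracking search over index choices in the same order but prunes any branch whose built string is not a prefix of a digit word of length k, so only a constant-branching tree is explored.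
import Mathlib
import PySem

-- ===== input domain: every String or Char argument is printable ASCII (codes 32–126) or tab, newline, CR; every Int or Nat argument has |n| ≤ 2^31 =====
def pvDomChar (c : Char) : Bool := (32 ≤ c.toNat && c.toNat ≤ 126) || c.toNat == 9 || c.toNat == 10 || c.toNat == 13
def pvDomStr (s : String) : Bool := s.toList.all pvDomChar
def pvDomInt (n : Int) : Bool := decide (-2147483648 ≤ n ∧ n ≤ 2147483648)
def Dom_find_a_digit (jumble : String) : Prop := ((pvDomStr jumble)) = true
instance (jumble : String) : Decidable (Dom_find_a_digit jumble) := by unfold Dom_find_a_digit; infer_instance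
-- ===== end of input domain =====

-- B replaces A's exhaustive enumeration of every k-permutation with a backtracking search
-- that explores index choices in the same order but only while the built string is still a
-- prefix of a digit word (objective: faster).

-- the module-level dict word_to_num_map (str keys modelled as List Char, PySem's string carrier)
def pvWmap : PySem.Dict (List Char) Int := PySem.Dict.ofList
  [(['z','e','r','o'], 0), (['o','n','e'], 1), (['t','w','o'], 2),
   (['t','h','r','e','e'], 3), (['f','o','u','r'], 4), (['f','i','v','e'], 5),
   (['s','i','x'], 6), (['s','e','v','e','n'], 7), (['e','i','g','h','t'], 8),
   (['n','i','n','e'], 9)]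

-- ===== PORT A =====
-- 'for i in range(min_len, max_len): for p in list(permutations(jumble, i)): …'
def pvLoopA (chars : List Char) : List Int → Option Int × Option String
  | [] => (none, none)
  | i :: rest =>
    match (PySem.List.permutations chars i.toNat).find? (fun p => pvWmap.contains p) with
    | some p => (pvWmap.get? p, some (String.ofList p))   -- return (word_to_num_map[c], c)
    | none => pvLoopA chars rest

def find_a_digit (jumble : String) : Option Int × Option String :=
  pvLoopA jumble.toList (PySem.List.pyRange 3 6 1)

-- ===== PORT B =====
-- prefixes = {w[:j] for w in word_to_num_map if len(w)==k for j in range(k+1)}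
-- (w[:j] with 0 ≤ j is List.take j — exact here; range(k+1) over the Nat k is List.range (k+1))
def pvPrefixSet (k : Nat) : PySem.Set (List Char) :=
  pvWmap.keys.foldl (fun acc w =>
    if w.length = k then
      (List.range (k + 1)).foldl (fun acc2 j => PySem.Set.add acc2 (w.take j)) acc
    else acc) PySem.Set.empty

-- dfs(avail, prefix); fuel is only a termination bound (each call grows prefix by 1, and
-- dfs is entered with fuel = k - len(prefix), so the fuel-0 branch is unreachable)
def pvDfs (P : PySem.Set (List Char)) (k : Nat) : Nat → List Char → List Char → Option (List Char)
  | fuel, avail, pre =>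
    if pre.length = k then some pre
    else
      match fuel with
      | 0 => none
      | fuel' + 1 =>
        (List.range avail.length).findSome? (fun idx =>
          match avail[idx]? with
          | none => none   -- unreachable: idx < len(avail)
          | some ch =>
            if PySem.Set.contains P (pre ++ [ch]) then
              pvDfs P k fuel' (avail.take idx ++ avail.drop (idx + 1)) (pre ++ [ch])
            else none)

def pvLoopB (chars : List Char) : List Int → Option Int × Option String
  | [] => (none, none)
  | kI :: rest =>
    let k := kI.toNat
    match pvDfs (pvPrefixSet k) k k chars [] with
    | some w => (pvWmap.get? w, some (String.ofList w))
    | none => pvLoopB chars rest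

def find_a_digit_alt (jumble : String) : Option Int × Option String :=
  pvLoopB jumble.toList (PySem.List.pyRange 3 6 1)

-- ===== PRECONDITION & SPEC =====
def Spec_find_a_digit (jumble : String) (out : Option Int × Option String) : Prop := out = find_a_digit_alt jumble
instance (jumble : String) (out : Option Int × Option String) : Decidable (Spec_find_a_digit jumble out) := by unfold Spec_find_a_digit; infer_instance

-- ===== CLAIM (what is proved, stated in full; the proofs are below) =====
def Claim_equal_find_a_digit : Prop := ∀ (jumble : String), Dom_find_a_digit jumble → Spec_find_a_digit jumble (find_a_digit jumble)

-- ===== LEMMAS AND PROOFS =====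

-- digit words by length
def pvW : Nat → List (List Char)
  | 3 => [['o','n','e'], ['t','w','o'], ['s','i','x']]
  | 4 => [['z','e','r','o'], ['f','o','u','r'], ['f','i','v','e'], ['n','i','n','e']]
  | 5 => [['t','h','r','e','e'], ['s','e','v','e','n'], ['e','i','g','h','t']]
  | _ => []

def pvAllW : List (List Char) :=
  [['z','e','r','o'], ['o','n','e'], ['t','w','o'], ['t','h','r','e','e'], ['f','o','u','r'],
   ['f','i','v','e'], ['s','i','x'], ['s','e','v','e','n'], ['e','i','g','h','t'], ['n','i','n','e']]

theorem pv_permutations_zero (xs : List Char) : PySem.List.permutations xs 0 = [[]] := rfl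

theorem pv_permutations_succ (xs : List Char) (r : Nat) :
    PySem.List.permutations xs (r + 1) =
      (List.range xs.length).flatMap (fun i =>
        match xs[i]? with
        | none => []
        | some c => (PySem.List.permutations (xs.eraseIdx i) r).map (c :: ·)) := by
  simp only [PySem.List.permutations]
  congr 1
  funext i
  cases xs[i]? <;> simp

theorem pv_find?_congr {α : Type} (p q : α → Bool) (l : List α)
    (h : ∀ x ∈ l, p x = q x) : l.find? p = l.find? q := by
  induction l with
  | nil => rfl
  | cons a l ih =>
    have ha := h a (by simp)
    simp only [List.find?_cons, ha]
    cases q a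
    · exact ih (fun x hx => h x (by simp [hx]))
    · rfl

theorem pv_perm_length (r : Nat) : ∀ (xs p : List Char),
    p ∈ PySem.List.permutations xs r → p.length = r := by
  induction r with
  | zero => intro xs p hp; rw [pv_permutations_zero] at hp; simp at hp; simp [hp]
  | succ r ih =>
    intro xs p hp
    rw [pv_permutations_succ] at hp
    simp only [List.mem_flatMap, List.mem_range] at hp
    obtain ⟨i, _, hp⟩ := hp
    cases h : xs[i]? with
    | none => rw [h] at hp; simp at hp
    | some c =>
      rw [h] at hp
      simp only [List.mem_map] at hp
      obtain ⟨q, hq, rfl⟩ := hp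
      simp [ih _ _ hq]

theorem pv_contains_wmap (p : List Char) : pvWmap.contains p = decide (p ∈ pvAllW) := by
  rw [PySem.Dict.contains_eq_decide_mem_keys, show pvWmap.keys = pvAllW from by decide]

theorem pv_mem_allW_of_len (k : Nat) (hk : k = 3 ∨ k = 4 ∨ k = 5) (p : List Char)
    (hlen : p.length = k) : p ∈ pvAllW ↔ p ∈ pvW k := by
  rcases hk with rfl | rfl | rfl <;>
    (constructor
     · intro h
       fin_cases h <;> simp_all [pvW]
     · intro h
       fin_cases h <;> decide)

theorem pv_W_len (k : Nat) : ∀ w ∈ pvW k, w.length = k := by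
  match k with
  | 3 | 4 | 5 => decide
  | 0 | 1 | 2 | (n + 6) => intro w hw; simp [pvW] at hw

theorem pv_prefixSet_iff (k : Nat) (hk : k = 3 ∨ k = 4 ∨ k = 5) (s : List Char) :
    PySem.Set.contains (pvPrefixSet k) s = true ↔ ∃ w ∈ pvW k, s <+: w := by
  rw [PySem.Set.contains_iff]
  rcases hk with rfl | rfl | rfl
  · rw [show pvPrefixSet 3 = ([[], ['o'], ['o','n'], ['o','n','e'], ['t'], ['t','w'], ['t','w','o'], ['s'], ['s','i'], ['s','i','x']] : List (List Char)) from by decide]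
    constructor
    · exact fun h => (by decide : ∀ x ∈ ([[], ['o'], ['o','n'], ['o','n','e'], ['t'], ['t','w'], ['t','w','o'], ['s'], ['s','i'], ['s','i','x']] : List (List Char)), ∃ w ∈ pvW 3, x <+: w) s h
    · rintro ⟨w, hw, hpre⟩
      rw [← List.mem_inits] at hpre
      exact (by decide : ∀ w ∈ pvW 3, ∀ x ∈ w.inits, x ∈ ([[], ['o'], ['o','n'], ['o','n','e'], ['t'], ['t','w'], ['t','w','o'], ['s'], ['s','i'], ['s','i','x']] : List (List Char))) w hw s hpre
  · rw [show pvPrefixSet 4 = ([[], ['z'], ['z','e'], ['z','e','r'], ['z','e','r','o'], ['f'], ['f','o'], ['f','o','u'], ['f','o','u','r'], ['f','i'], ['f','i','v'], ['f','i','v','e'], ['n'], ['n','i'], ['n','i','n'], ['n','i','n','e']] : List (List Char)) from by decide]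
    constructor
    · exact fun h => (by decide : ∀ x ∈ ([[], ['z'], ['z','e'], ['z','e','r'], ['z','e','r','o'], ['f'], ['f','o'], ['f','o','u'], ['f','o','u','r'], ['f','i'], ['f','i','v'], ['f','i','v','e'], ['n'], ['n','i'], ['n','i','n'], ['n','i','n','e']] : List (List Char)), ∃ w ∈ pvW 4, x <+: w) s h
    · rintro ⟨w, hw, hpre⟩
      rw [← List.mem_inits] at hpre
      exact (by decide : ∀ w ∈ pvW 4, ∀ x ∈ w.inits, x ∈ ([[], ['z'], ['z','e'], ['z','e','r'], ['z','e','r','o'], ['f'], ['f','o'], ['f','o','u'], ['f','o','u','r'], ['f','i'], ['f','i','v'], ['f','i','v','e'], ['n'], ['n','i'], ['n','i','n'], ['n','i','n','e']] : List (List Char))) w hw s hpre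
  · rw [show pvPrefixSet 5 = ([[], ['t'], ['t','h'], ['t','h','r'], ['t','h','r','e'], ['t','h','r','e','e'], ['s'], ['s','e'], ['s','e','v'], ['s','e','v','e'], ['s','e','v','e','n'], ['e'], ['e','i'], ['e','i','g'], ['e','i','g','h'], ['e','i','g','h','t']] : List (List Char)) from by decide]
    constructor
    · exact fun h => (by decide : ∀ x ∈ ([[], ['t'], ['t','h'], ['t','h','r'], ['t','h','r','e'], ['t','h','r','e','e'], ['s'], ['s','e'], ['s','e','v'], ['s','e','v','e'], ['s','e','v','e','n'], ['e'], ['e','i'], ['e','i','g'], ['e','i','g','h'], ['e','i','g','h','t']] : List (List Char)), ∃ w ∈ pvW 5, x <+: w) s h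
    · rintro ⟨w, hw, hpre⟩
      rw [← List.mem_inits] at hpre
      exact (by decide : ∀ w ∈ pvW 5, ∀ x ∈ w.inits, x ∈ ([[], ['t'], ['t','h'], ['t','h','r'], ['t','h','r','e'], ['t','h','r','e','e'], ['s'], ['s','e'], ['s','e','v'], ['s','e','v','e'], ['s','e','v','e','n'], ['e'], ['e','i'], ['e','i','g'], ['e','i','g','h'], ['e','i','g','h','t']] : List (List Char))) w hw s hpre

-- main invariant: the pruned dfs returns exactly the first full permutation extending pre
-- whose word lies in W
theorem pv_dfs_eq (W : List (List Char)) (P : PySem.Set (List Char)) (k : Nat)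
    (HWlen : ∀ w ∈ W, w.length = k)
    (HP : ∀ s, PySem.Set.contains P s = true ↔ ∃ w ∈ W, s <+: w) :
    ∀ (fuel : Nat) (avail pre : List Char), pre.length + fuel = k → (∃ w ∈ W, pre <+: w) →
      pvDfs P k fuel avail pre
        = ((PySem.List.permutations avail fuel).find? (fun p => decide ((pre ++ p) ∈ W))).map
            (fun p => pre ++ p) := by
  intro fuel
  induction fuel with
  | zero =>
    intro avail pre hlen hpre
    obtain ⟨w, hw, hp⟩ := hpre
    have hwl := HWlen w hw
    have hpw : pre = w := hp.eq_of_length (by omega)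
    subst hpw
    rw [pv_permutations_zero]
    simp [pvDfs, hwl, List.find?, hw]
  | succ fuel' ih =>
    intro avail pre hlen hpre
    have hne : pre.length ≠ k := by omega
    conv_lhs => simp only [pvDfs]
    rw [if_neg hne, pv_permutations_succ, List.find?_flatMap, List.map_findSome?]
    congr 1
    funext idx
    simp only [Function.comp_apply]
    cases h : avail[idx]? with
    | none => simp
    | some ch =>
      dsimp only
      rw [List.find?_map]
      by_cases hc : PySem.Set.contains P (pre ++ [ch]) = true
      · rw [if_pos hc]
        have hpre' : ∃ w ∈ W, (pre ++ [ch]) <+: w := (HP _).mp hc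
        have hlen' : (pre ++ [ch]).length + fuel' = k := by simp; omega
        rw [show (List.take idx avail ++ List.drop (idx + 1) avail) = avail.eraseIdx idx from
          (List.eraseIdx_eq_take_drop_succ _ _).symm]
        rw [ih (avail.eraseIdx idx) (pre ++ [ch]) hlen' hpre']
        rw [Option.map_map]
        rw [show ((fun p => decide ((pre ++ p) ∈ W)) ∘ (fun x => ch :: x))
            = (fun p => decide (((pre ++ [ch]) ++ p) ∈ W)) from by
          funext q
          simp [Function.comp, List.append_assoc]]
        congr 1
        funext q
        simp [Function.comp, List.append_assoc]
      · rw [if_neg hc]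
        have hnone : (PySem.List.permutations (avail.eraseIdx idx) fuel').find?
            ((fun p => decide ((pre ++ p) ∈ W)) ∘ (fun x => ch :: x)) = none := by
          rw [List.find?_eq_none]
          intro q hq hmem
          simp only [Function.comp_apply, decide_eq_true_eq] at hmem
          exact hc ((HP _).mpr ⟨_, hmem, ⟨q, by simp⟩⟩)
        rw [hnone]
        rfl

theorem pv_step_eq (k : Nat) (hk : k = 3 ∨ k = 4 ∨ k = 5) (chars : List Char) :
    pvDfs (pvPrefixSet k) k k chars []
      = (PySem.List.permutations chars k).find? (fun p => pvWmap.contains p) := by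
  have hw : ∃ w ∈ pvW k, ([] : List Char) <+: w := by
    rcases hk with rfl | rfl | rfl
    · exact ⟨['o','n','e'], by decide, List.nil_prefix⟩
    · exact ⟨['z','e','r','o'], by decide, List.nil_prefix⟩
    · exact ⟨['t','h','r','e','e'], by decide, List.nil_prefix⟩
  rw [pv_dfs_eq (pvW k) (pvPrefixSet k) k (pv_W_len k) (pv_prefixSet_iff k hk) k chars []
    (by simp) hw]
  rw [pv_find?_congr (fun p => decide (([] : List Char) ++ p ∈ pvW k)) (fun p => pvWmap.contains p)
    _ (fun p hp => ?_)]
  · cases (PySem.List.permutations chars k).find? (fun p => pvWmap.contains p) <;> simp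
  · have hl := pv_perm_length k chars p hp
    simp only [List.nil_append]
    rw [pv_contains_wmap]
    exact (decide_eq_decide.mpr (pv_mem_allW_of_len k hk p hl)).symm

-- ===== VERDICT (by name: the statement is the Claim_ definition above) =====
theorem find_a_digit_spec : Claim_equal_find_a_digit := by
  intro jumble _
  unfold Spec_find_a_digit find_a_digit find_a_digit_alt
  rw [show PySem.List.pyRange 3 6 1 = [3, 4, 5] from by decide]
  generalize jumble.toList = chars
  simp only [pvLoopA, pvLoopB]
  rw [show Int.toNat 3 = 3 from rfl, show Int.toNat 4 = 4 from rfl, show Int.toNat 5 = 5 from rfl]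
  rw [pv_step_eq 3 (by norm_num), pv_step_eq 4 (by norm_num), pv_step_eq 5 (by norm_num)]
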